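-- pv_equiv track=rewrite | github.com/Abhijat-M/DSA | Array/count_spec_pairs_ft.py | solve
-- ===== SOURCE A (Python) =====
-- class FenwickTree:
--     """
--     A class for a Fenwick Tree (or Binary Indexed Tree).
--     This data structure is efficient for calculating prefix sums and updating values.
--     It's used here to maintain a histogram of counts and quickly query it.
--     """
--     def __init__(self, size):
--         self.size = size
--         self.tree = [0] * (size + 1)
--
--     def update(self, index, delta):
--         """
--         Adds a delta to the value at a given index.
--         This operation propagates the change up the tree.
--         Time complexity: O(log N)
--         """
--         while index <= self.size:
--             self.tree[index] += delta
--             index += index & -index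
--
--     def query(self, index):
--         """
--         Calculates the sum of values from the start up to the given index.
--         This is the prefix sum.
--         Time complexity: O(log N)
--         """
--         s = 0
--         while index > 0:
--             s += self.tree[index]
--             index -= index & -index
--         return s
--
-- def solve(n, a):
--     """
--     Solves the Counting Special Pairs problem.
--
--     Args:
--         n (int): The number of elements in the array.
--         a (list[int]): The input array of integers.
--
--     Returns:
--         int: The total number of special pairs (i, j).
--     """
--     if n <= 1:
--         return 0
--
--     prefix_counts = [0] * n
--     freq_map = {}
--     for i in range(n):
--         val = a[i]
--         freq_map[val] = freq_map.get(val, 0) + 1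
--         prefix_counts[i] = freq_map[val]
--
--
--     suffix_counts = [0] * n
--     freq_map = {}
--     for i in range(n - 1, -1, -1):
--         val = a[i]
--         freq_map[val] = freq_map.get(val, 0) + 1
--         suffix_counts[i] = freq_map[val]
--
--
--     bit = FenwickTree(n)
--     total_pairs = 0
--
--     for i in range(n - 1, -1, -1):
--         count_less = bit.query(prefix_counts[i] - 1)
--         total_pairs += count_less
--
--         bit.update(suffix_counts[i], 1)
--
--     return total_pairs
-- ===== SOURCE B (Python) =====
-- def solve(n, a):
--     if n <= 1:
--         return 0
--
--     prefix_counts = [0] * n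
--     freq_map = {}
--     for i in range(n):
--         val = a[i]
--         freq_map[val] = freq_map.get(val, 0) + 1
--         prefix_counts[i] = freq_map[val]
--
--     suffix_counts = [0] * n
--     freq_map = {}
--     for i in range(n - 1, -1, -1):
--         val = a[i]
--         freq_map[val] = freq_map.get(val, 0) + 1
--         suffix_counts[i] = freq_map[val]
--
--     total = 0
--     for i in range(n):
--         for j in range(i + 1, n):
--             if suffix_counts[j] < prefix_counts[i]:
--                 total += 1
--     return total
-- ===== Notes on version B (the rewrite author's own statement) =====
-- stated objective: simpler
-- what changed: The FenwickTree class and its incremental update/query histogram phase are removed; after the identical prefix/suffix frequency passes, B counts the special pairs directly with a plain nested loop over index pairs i<j testing suffix_counts[j] < prefix_counts[i].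
import Mathlib
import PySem

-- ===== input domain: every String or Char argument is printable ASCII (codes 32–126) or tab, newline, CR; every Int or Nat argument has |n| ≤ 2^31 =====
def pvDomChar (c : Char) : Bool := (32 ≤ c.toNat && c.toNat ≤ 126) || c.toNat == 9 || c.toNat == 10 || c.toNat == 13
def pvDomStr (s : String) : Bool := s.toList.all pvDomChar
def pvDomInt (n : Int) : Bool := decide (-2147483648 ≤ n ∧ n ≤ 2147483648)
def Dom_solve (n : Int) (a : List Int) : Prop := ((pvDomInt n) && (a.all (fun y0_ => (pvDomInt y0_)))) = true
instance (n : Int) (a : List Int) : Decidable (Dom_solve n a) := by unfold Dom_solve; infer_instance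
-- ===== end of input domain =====

-- B drops the FenwickTree phase of A and counts the pairs i<j with suffix_counts[j] < prefix_counts[i]
-- by a plain nested loop; the prefix/suffix frequency passes are identical in both (shared helpers below).

-- ===== PORT A =====
-- the frequency pass 'freq_map[val] = freq_map.get(val, 0) + 1; counts[i] = freq_map[val]'
-- (identical in A and B, hence shared; exact: indices produced by range(n) are in range under Pre_)
def passStep (a : List Int) (st : List Int × PySem.Dict Int Int) (i : Int) : List Int × PySem.Dict Int Int :=
  let val := PySem.List.pyGetD a i 0
  let c := st.2.getD val 0 + 1
  (st.1.set i.toNat c, st.2.insert val c)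

def pcList (n : Int) (a : List Int) : List Int :=
  ((PySem.List.pyRange 0 n 1).foldl (passStep a) (List.replicate n.toNat 0, PySem.Dict.empty)).1

def scList (n : Int) (a : List Int) : List Int :=
  ((PySem.List.pyRange (n-1) (-1) (-1)).foldl (passStep a) (List.replicate n.toNat 0, PySem.Dict.empty)).1

-- FenwickTree.update: 'while index <= self.size: tree[index] += delta; index += index & -index'
-- (fuel only bounds the while loop; the calls in solve supply enough fuel for it never to cut the loop short)
def fenUpdate (size delta : Int) : List Int → Int → Nat → List Int
  | tree, _, 0 => tree
  | tree, index, fuel+1 =>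
    if index ≤ size then
      fenUpdate size delta (tree.set index.toNat (tree.getD index.toNat 0 + delta))
        (index + PySem.Int.band index (-index)) fuel
    else tree

-- FenwickTree.query: 's = 0; while index > 0: s += tree[index]; index -= index & -index'
def fenQuery (tree : List Int) : Int → Int → Nat → Int
  | _, s, 0 => s
  | index, s, fuel+1 =>
    if 0 < index then
      fenQuery tree (index - PySem.Int.band index (-index)) (s + tree.getD index.toNat 0) fuel
    else s

def solve (n : Int) (a : List Int) : Int :=
  if n ≤ 1 then 0
  else
    let pc := pcList n a
    let sc := scList n a
    ((PySem.List.pyRange (n-1) (-1) (-1)).foldl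
      (fun (st : List Int × Int) i =>
        let countLess := fenQuery st.1 (PySem.List.pyGetD pc i 0 - 1) 0 (n.toNat + 1)
        (fenUpdate n 1 st.1 (PySem.List.pyGetD sc i 0) (n.toNat + 1), st.2 + countLess))
      (List.replicate (n.toNat + 1) 0, 0)).2

-- ===== PORT B =====
def solve_alt (n : Int) (a : List Int) : Int :=
  if n ≤ 1 then 0
  else
    let pc := pcList n a
    let sc := scList n a
    (PySem.List.pyRange 0 n 1).foldl (fun total i =>
      (PySem.List.pyRange (i+1) n 1).foldl (fun total j =>
        if PySem.List.pyGetD sc j 0 < PySem.List.pyGetD pc i 0 then total + 1 else total) total) 0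

-- ===== PRECONDITION & SPEC =====
-- A indexes a[i] for every i in range(n) when n ≥ 2, so it raises IndexError exactly when 2 ≤ n and n > len(a)
def Pre_solve (n : Int) (a : List Int) : Prop := n ≤ 1 ∨ n ≤ (a.length : Int)
instance (n : Int) (a : List Int) : Decidable (Pre_solve n a) := by unfold Pre_solve; infer_instance
def pvWitness_solve : Int × List Int := (3, [1, 1, 2])

def Spec_solve (n : Int) (a : List Int) (out : Int) : Prop := out = solve_alt n a
instance (n : Int) (a : List Int) (out : Int) : Decidable (Spec_solve n a out) := by unfold Spec_solve; infer_instance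

-- ===== CLAIM (what is proved, stated in full; the proofs are below) =====
def Claim_equal_solve : Prop := ∀ (n : Int) (a : List Int), Dom_solve n a → Pre_solve n a → Spec_solve n a (solve n a)

-- ===== LEMMAS AND PROOFS =====

-- ---------- lowbit over Nat: lbN m = m & -m in Python (see band_lift below) ----------
def lbN (m : Nat) : Nat := m - (m &&& (m - 1))

theorem land_oe (a b : Nat) : (2*a+1) &&& (2*b) = 2*(a &&& b) := by
  apply Nat.eq_of_testBit_eq
  intro i
  rw [Nat.testBit_and]
  cases i with
  | zero => simp [Nat.testBit_zero]
  | succ j =>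
    simp only [Nat.testBit_succ]
    have h1 : (2*a+1)/2 = a := by omega
    have h2 : (2*b)/2 = b := by omega
    have h3 : (2*(a &&& b))/2 = (a &&& b) := by omega
    rw [h1, h2, h3, Nat.testBit_and]

theorem land_eo (a b : Nat) : (2*a) &&& (2*b+1) = 2*(a &&& b) := by
  apply Nat.eq_of_testBit_eq
  intro i
  rw [Nat.testBit_and]
  cases i with
  | zero => simp [Nat.testBit_zero]
  | succ j =>
    simp only [Nat.testBit_succ]
    have h1 : (2*a)/2 = a := by omega
    have h2 : (2*b+1)/2 = b := by omega
    have h3 : (2*(a &&& b))/2 = (a &&& b) := by omega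
    rw [h1, h2, h3, Nat.testBit_and]

theorem lbN_le (m : Nat) : lbN m ≤ m := Nat.sub_le _ _

theorem lbN_odd (m : Nat) (h : m % 2 = 1) : lbN m = 1 := by
  obtain ⟨k, rfl⟩ : ∃ k, m = 2*k+1 := ⟨m/2, by omega⟩
  have h1 : (2*k+1) - 1 = 2*k := by omega
  have h2 : (2*k+1) &&& (2*k) = 2*(k &&& k) := land_oe k k
  have h3 : k &&& k = k := Nat.and_self k
  unfold lbN
  rw [h1, h2, h3]
  omega

theorem lbN_even (k : Nat) (h : 0 < k) : lbN (2*k) = 2 * lbN k := by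
  obtain ⟨c, rfl⟩ : ∃ c, k = c + 1 := ⟨k - 1, by omega⟩
  have h1 : 2*(c+1) - 1 = 2*c+1 := by omega
  have h2 : (2*(c+1)) &&& (2*c+1) = 2*((c+1) &&& c) := land_eo (c+1) c
  have h3 : (c+1) &&& c ≤ c + 1 := Nat.and_le_left
  have h4 : (c+1) - 1 = c := by omega
  unfold lbN
  rw [h1, h2, h4]
  omega

theorem lbN_pos (m : Nat) (h : 0 < m) : 0 < lbN m := by
  induction m using Nat.strong_induction_on with
  | _ m ih =>
    rcases Nat.even_or_odd m with he | ho
    · obtain ⟨k, hk⟩ := he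
      have hk' : m = 2*k := by omega
      have hkpos : 0 < k := by omega
      rw [hk', lbN_even k hkpos]
      have := ih k (by omega) hkpos
      omega
    · rw [lbN_odd m (Nat.odd_iff.mp ho)]; omega

theorem lbN_double_le (m : Nat) (h : 0 < m) : 2 * lbN m ≤ lbN (m + lbN m) := by
  induction m using Nat.strong_induction_on with
  | _ m ih =>
    rcases Nat.even_or_odd m with he | ho
    · obtain ⟨k, hk⟩ := he
      have hk' : m = 2*k := by omega
      have hkpos : 0 < k := by omega
      have hrw : 2*k + 2*lbN k = 2*(k + lbN k) := by omega
      rw [hk', lbN_even k hkpos, hrw, lbN_even (k + lbN k) (by omega)]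
      have := ih k (by omega) hkpos
      omega
    · have h1 : lbN m = 1 := lbN_odd m (Nat.odd_iff.mp ho)
      have hm1 : m % 2 = 1 := Nat.odd_iff.mp ho
      have h2 : m + 1 = 2*((m+1)/2) := by omega
      have h3 : 0 < (m+1)/2 := by omega
      rw [h1, h2, lbN_even _ h3]
      have := lbN_pos ((m+1)/2) h3
      omega

theorem lbN_step_le (m : Nat) : ∀ (r : Nat), 0 < r → r < lbN m → r + lbN r ≤ lbN m := by
  induction m using Nat.strong_induction_on with
  | _ m ih =>
    intro r hr hrm
    rcases Nat.even_or_odd m with he | ho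
    · obtain ⟨k, hk⟩ := he
      have hk' : m = 2*k := by omega
      by_cases hk0 : 0 < k
      · rw [hk', lbN_even k hk0] at hrm ⊢
        rcases Nat.even_or_odd r with hre | hro
        · obtain ⟨r', hr'⟩ := hre
          have hr'' : r = 2*r' := by omega
          have hr'pos : 0 < r' := by omega
          have := ih k (by omega) r' hr'pos (by omega)
          rw [hr'', lbN_even r' hr'pos]
          omega
        · have := lbN_odd r (Nat.odd_iff.mp hro)
          have hodd : r % 2 = 1 := Nat.odd_iff.mp hro
          omega
      · have : m = 0 := by omega
        subst this
        simp [lbN] at hrm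
    · have := lbN_odd m (Nat.odd_iff.mp ho)
      omega

theorem lbN_add_lt (m : Nat) : ∀ (r : Nat), 0 < m → 0 < r → r < lbN m → lbN (m + r) = lbN r := by
  induction m using Nat.strong_induction_on with
  | _ m ih =>
    intro r hm hr hrm
    rcases Nat.even_or_odd m with he | ho
    · obtain ⟨k, hk⟩ := he
      have hk' : m = 2*k := by omega
      have hk0 : 0 < k := by omega
      rw [hk', lbN_even k hk0] at hrm
      rcases Nat.even_or_odd r with hre | hro
      · obtain ⟨r', hr'⟩ := hre
        have hr'' : r = 2*r' := by omega
        have hr'pos : 0 < r' := by omega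
        have h1 : m + r = 2*(k + r') := by omega
        rw [h1, lbN_even (k + r') (by omega), hr'', lbN_even r' hr'pos,
          ih k (by omega) r' hk0 hr'pos (by omega)]
      · have h1 : (m + r) % 2 = 1 := by
          have := Nat.odd_iff.mp hro
          omega
        rw [lbN_odd (m + r) h1, lbN_odd r (Nat.odd_iff.mp hro)]
    · have := lbN_odd m (Nat.odd_iff.mp ho)
      omega

theorem lbN_sub_le (k : Nat) (h : 0 < k) (h2 : 0 < k - lbN k) : 2 * lbN k ≤ lbN (k - lbN k) := by
  induction k using Nat.strong_induction_on with
  | _ k ih =>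
    rcases Nat.even_or_odd k with he | ho
    · obtain ⟨c, hc⟩ := he
      have hc' : k = 2*c := by omega
      have hc0 : 0 < c := by omega
      have hlb : lbN k = 2 * lbN c := by rw [hc']; exact lbN_even c hc0
      have hle : lbN c ≤ c := lbN_le c
      have hsub : k - lbN k = 2*(c - lbN c) := by omega
      have hpos : 0 < c - lbN c := by omega
      rw [hsub, lbN_even (c - lbN c) hpos, hlb]
      have := ih c (by omega) hc0 hpos
      omega
    · have h1 : lbN k = 1 := lbN_odd k (Nat.odd_iff.mp ho)
      have h2' : k - 1 = 2*((k-1)/2) := by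
        have := Nat.odd_iff.mp ho
        omega
      have h3 : 0 < (k-1)/2 := by omega
      rw [h1, h2', lbN_even _ h3]
      have := lbN_pos ((k-1)/2) h3
      omega

-- ---------- Python's  i & -i  on a positive int is lbN ----------
theorem band_lift (m : Nat) (h : 1 ≤ m) : PySem.Int.band (↑m) (-↑m) = ↑(lbN m) := by
  unfold lbN
  simp only [PySem.Int.band]
  rw [if_pos (by positivity), if_neg (by omega)]
  have h1 : (-(-(m:Int)) - 1).toNat = m - 1 := by omega
  have h2 : ((m:Int)).toNat = m := by omega
  rw [h1, h2]

-- ---------- Nat-level models of update / query ----------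
def updN (size : Nat) : List Int → Nat → Nat → List Int
  | t, _, 0 => t
  | t, i, f+1 =>
    if i ≤ size then updN size (t.set i (t.getD i 0 + 1)) (i + lbN i) f else t

def qryN (t : List Int) : Nat → Int → Nat → Int
  | _, s, 0 => s
  | i, s, f+1 => if 0 < i then qryN t (i - lbN i) (s + t.getD i 0) f else s

theorem lift_upd (size : Nat) : ∀ (f : Nat) (t : List Int) (v : Nat), 1 ≤ v →
    fenUpdate (↑size) 1 t (↑v) f = updN size t v f := by
  intro f
  induction f with
  | zero => intro t v _; rfl
  | succ f ih =>
    intro t v hv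
    rw [fenUpdate, updN]
    by_cases h : v ≤ size
    · rw [if_pos (by exact_mod_cast h), if_pos h, band_lift v hv]
      have h1 : ((v:Int)).toNat = v := by omega
      have h2 : (v:Int) + ↑(lbN v) = ((v + lbN v : Nat) : Int) := by push_cast; ring
      rw [h1, h2, ih _ (v + lbN v) (by omega)]
    · rw [if_neg (by exact_mod_cast h), if_neg h]

theorem lift_qry : ∀ (f : Nat) (t : List Int) (i : Int) (s : Int),
    fenQuery t i s f = qryN t i.toNat s f := by
  intro f
  induction f with
  | zero => intro t i s; rfl
  | succ f ih =>
    intro t i s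
    rw [fenQuery, qryN]
    by_cases h : 0 < i
    · rw [if_pos h, if_pos (by omega)]
      have hm : 1 ≤ i.toNat := by omega
      have hb : PySem.Int.band i (-i) = ↑(lbN i.toNat) := by
        have : i = ↑i.toNat := by omega
        rw [this] at *
        exact band_lift i.toNat hm
      rw [hb, ih]
      congr 1
      have := lbN_le i.toNat
      omega
    · rw [if_neg h, if_neg (by omega)]

-- ---------- pointwise facts about updN / qryN ----------
theorem getD_set_eq (l : List Int) (i : Nat) (v : Int) (j : Nat) :
    (l.set i v).getD j 0 = if i = j ∧ i < l.length then v else l.getD j 0 := by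
  simp only [List.getD_eq_getElem?_getD, List.getElem?_set]
  by_cases hij : i = j
  · subst hij
    by_cases hlen : i < l.length
    · simp [hlen]
    · rw [List.getElem?_eq_none (by omega)]
      simp [hlen]
  · simp [hij]

theorem updN_length (size : Nat) : ∀ (f : Nat) (t : List Int) (i : Nat),
    (updN size t i f).length = t.length := by
  intro f
  induction f with
  | zero => intro t i; rfl
  | succ f ih =>
    intro t i
    rw [updN]
    split
    · rw [ih]; exact List.length_set
    · rfl

theorem updN_getD_lt (size : Nat) : ∀ (f : Nat) (t : List Int) (i j : Nat), j < i →
    (updN size t i f).getD j 0 = t.getD j 0 := by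
  intro f
  induction f with
  | zero => intro t i j _; rfl
  | succ f ih =>
    intro t i j hj
    rw [updN]
    split
    · rw [ih _ (i + lbN i) j (by omega), getD_set_eq, if_neg (by omega)]
    · rfl

theorem updN_miss (size : Nat) (v : Nat) : ∀ (f : Nat) (t : List Int) (i j : Nat),
    0 < i → v ≤ i → i - lbN i < v → ¬(v ≤ j ∧ j - lbN j < v) →
    (updN size t i f).getD j 0 = t.getD j 0 := by
  intro f
  induction f with
  | zero => intro t i j _ _ _ _; rfl
  | succ f ih =>
    intro t i j hi hvi hilb hj
    rw [updN]
    split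
    · have hne : i ≠ j := by
        intro hij
        exact hj ⟨hij ▸ hvi, hij ▸ hilb⟩
      have hdl := lbN_double_le i hi
      rw [ih _ (i + lbN i) j (by have := lbN_pos i hi; omega) (by omega) (by omega) hj,
        getD_set_eq, if_neg (by omega)]
    · rfl

theorem updN_hit (size : Nat) : ∀ (f : Nat) (t : List Int) (i k : Nat),
    0 < i → i ≤ k → k - lbN k < i → k ≤ size → size < i + f → k < t.length →
    (updN size t i f).getD k 0 = t.getD k 0 + 1 := by
  intro f
  induction f with
  | zero => intro t i k _ hik _ hks hf _; omega
  | succ f ih =>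
    intro t i k hi hik hklb hks hf hkl
    rw [updN, if_pos (by omega)]
    by_cases hik' : i = k
    · subst hik'
      rw [updN_getD_lt size f _ (i + lbN i) i (by have := lbN_pos i hi; omega),
        getD_set_eq, if_pos ⟨rfl, hkl⟩]
    · have hik2 : i < k := by omega
      have hlbk : lbN k ≤ k := lbN_le k
      have hlbkpos : 0 < lbN k := lbN_pos k (by omega)
      -- write i = (k - lbN k) + r with 0 < r < lbN k
      have hr1 : 0 < i - (k - lbN k) := by omega
      have hr2 : i - (k - lbN k) < lbN k := by omega
      have hlbi : lbN i = lbN (i - (k - lbN k)) := by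
        by_cases hm0 : k - lbN k = 0
        · congr 1; omega
        · have hN6 := lbN_sub_le k (by omega) (by omega)
          have heq : i = (k - lbN k) + (i - (k - lbN k)) := by omega
          conv_lhs => rw [heq]
          exact lbN_add_lt (k - lbN k) _ (by omega) hr1 (by omega)
      have hN5 := lbN_step_le k (i - (k - lbN k)) hr1 hr2
      have hlbipos : 0 < lbN i := lbN_pos i hi
      rw [ih _ (i + lbN i) k (by omega) (by omega) (by omega) hks (by omega)
        (by rw [List.length_set]; exact hkl),
        getD_set_eq, if_neg (by omega)]

theorem qryN_acc (t : List Int) : ∀ (f : Nat) (i : Nat) (s c : Int),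
    qryN t i (s + c) f = qryN t i s f + c := by
  intro f
  induction f with
  | zero => intro i s c; rfl
  | succ f ih =>
    intro i s c
    rw [qryN, qryN]
    split
    · have : s + c + t.getD i 0 = (s + t.getD i 0) + c := by ring
      rw [this, ih]
    · rfl

theorem qryN_congr (t t' : List Int) : ∀ (f : Nat) (i : Nat) (s : Int),
    (∀ j, 1 ≤ j → j ≤ i → t.getD j 0 = t'.getD j 0) →
    qryN t i s f = qryN t' i s f := by
  intro f
  induction f with
  | zero => intro i s _; rfl
  | succ f ih =>
    intro i s h
    rw [qryN, qryN]
    split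
    · rw [h i (by omega) le_rfl]
      exact ih (i - lbN i) _ (fun j h1 h2 => h j h1 (by omega))
    · rfl

theorem qryN_zero_of (t : List Int) (h : ∀ j, t.getD j 0 = 0) :
    ∀ (f : Nat) (i : Nat) (s : Int), qryN t i s f = s := by
  intro f
  induction f with
  | zero => intro i s; rfl
  | succ f ih =>
    intro i s
    rw [qryN]
    split
    · rw [h i, add_zero, ih]
    · rfl

-- ---------- the key step: one update shifts every sufficient-fuel query by [v ≤ k] ----------
theorem stepQ (size : Nat) : ∀ (fq : Nat) (k : Nat), k ≤ size → k < fq →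
    ∀ (s : Int) (t : List Int) (v : Nat) (fu : Nat),
    1 ≤ v → v ≤ size → size < v + fu → t.length = size + 1 →
    qryN (updN size t v fu) k s fq = qryN t k s fq + (if v ≤ k then 1 else 0) := by
  intro fq
  induction fq with
  | zero => intro k _ hk; omega
  | succ fq ih =>
    intro k hks hkfq s t v fu hv1 hvs hfu hlen
    by_cases hvk : v ≤ k
    · have hk0 : 0 < k := by omega
      rw [if_pos hvk]
      rw [qryN, qryN, if_pos hk0, if_pos hk0]
      have hlbk := lbN_pos k hk0
      have hlble := lbN_le k
      by_cases h2 : v ≤ k - lbN k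
      · have hmiss : (updN size t v fu).getD k 0 = t.getD k 0 :=
          updN_miss size v fu t v k (by omega) le_rfl (by have := lbN_pos v (by omega); omega)
            (by omega)
        rw [hmiss, ih (k - lbN k) (by omega) (by omega) (s + t.getD k 0) t v fu hv1 hvs hfu hlen,
          if_pos h2]
      · have hhit : (updN size t v fu).getD k 0 = t.getD k 0 + 1 :=
          updN_hit size fu t v k (by omega) hvk (by omega) hks hfu (by omega)
        rw [hhit]
        have hcong : qryN (updN size t v fu) (k - lbN k) (s + (t.getD k 0 + 1)) fq =
            qryN t (k - lbN k) (s + (t.getD k 0 + 1)) fq :=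
          qryN_congr _ _ fq (k - lbN k) _
            (fun j h1 hj2 => updN_getD_lt size fu t v j (by omega))
        rw [hcong, show s + (t.getD k 0 + 1) = (s + t.getD k 0) + 1 by ring, qryN_acc]
    · rw [if_neg hvk, add_zero]
      exact qryN_congr _ _ (fq+1) k s
        (fun j h1 h2 => updN_getD_lt size fu t v j (by omega))

-- ---------- the Fenwick tree built from a list of inserted values answers counts ----------
def buildN (size : Nat) (vs : List Nat) : List Int :=
  vs.foldl (fun t v => updN size t v (size + 1)) (List.replicate (size + 1) 0)

theorem buildN_append (size : Nat) (vs : List Nat) (v : Nat) :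
    buildN size (vs ++ [v]) = updN size (buildN size vs) v (size + 1) := by
  simp [buildN, List.foldl_append]

theorem buildN_length (size : Nat) (vs : List Nat) : (buildN size vs).length = size + 1 := by
  induction vs using List.reverseRecOn with
  | nil => simp [buildN]
  | append_singleton vs v ih => rw [buildN_append, updN_length, ih]

theorem qcount (size : Nat) (vs : List Nat) :
    ∀ (k : Nat) (s : Int) (fq : Nat), (∀ v ∈ vs, 1 ≤ v ∧ v ≤ size) → k ≤ size → k < fq →
    qryN (buildN size vs) k s fq = s + ((vs.countP (fun v => decide (v ≤ k)) : Nat) : Int) := by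
  induction vs using List.reverseRecOn with
  | nil =>
    intro k s fq _ _ _
    rw [qryN_zero_of]
    · simp
    · intro j
      simp [buildN, List.getD_eq_getElem?_getD, List.getElem?_replicate]
      split <;> simp
  | append_singleton vs v ih =>
    intro k s fq hmem hks hkfq
    have hv := hmem v (by simp)
    rw [buildN_append,
      stepQ size fq k hks hkfq s (buildN size vs) v (size+1) hv.1 hv.2 (by omega)
        (buildN_length size vs),
      ih k s fq (fun w hw => hmem w (by simp [hw])) hks hkfq,
      List.countP_append]
    simp only [List.countP_cons, List.countP_nil]
    push_cast
    split_ifs with h1 h2 h2 <;> simp_all <;> omega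

-- ---------- the prefix/suffix passes produce values in [1, n] ----------
theorem passBounds (a : List Int) (N : Nat) : ∀ (ix : List Int) (lst : List Int)
    (d : PySem.Dict Int Int),
    lst.length = N →
    (∀ x, 0 ≤ d.getD x 0 ∧ d.getD x 0 + (ix.length : Int) ≤ (N : Int)) →
    (∀ j, j < N → (((j:Int) ∈ ix) ∨ (1 ≤ lst.getD j 0 ∧ lst.getD j 0 ≤ (N:Int)))) →
    (∀ i ∈ ix, 0 ≤ i ∧ i < (N:Int)) →
    (ix.foldl (passStep a) (lst, d)).1.length = N ∧
    (∀ j, j < N → 1 ≤ (ix.foldl (passStep a) (lst, d)).1.getD j 0 ∧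
      (ix.foldl (passStep a) (lst, d)).1.getD j 0 ≤ (N:Int)) := by
  intro ix
  induction ix with
  | nil =>
    intro lst d hlen hd hgood _
    refine ⟨hlen, fun j hj => ?_⟩
    rcases hgood j hj with h | h
    · simp at h
    · exact h
  | cons i ix ih =>
    intro lst d hlen hd hgood hbnd
    have hi := hbnd i (by simp)
    have hdv := hd (PySem.List.pyGetD a i 0)
    simp only [List.foldl_cons]
    apply ih
    · simp [hlen]
    · intro x
      simp only [passStep]
      rw [PySem.Dict.getD_insert]
      have := hd x
      split_ifs with hx
      · simp only [List.length_cons] at hdv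
        constructor
        · omega
        · push_cast at hdv ⊢; omega
      · simp only [List.length_cons] at this
        push_cast at this ⊢; omega
    · intro j hj
      simp only [passStep]
      by_cases hji : (j : Int) = i
      · right
        have hjt : i.toNat = j := by omega
        rw [getD_set_eq, if_pos ⟨hjt, by omega⟩]
        simp only [List.length_cons] at hdv
        push_cast at hdv ⊢
        omega
      · rcases hgood j hj with hmem | hok
        · left
          rcases List.mem_cons.mp hmem with h | h
          · exact absurd h hji
          · exact h
        · right
          rw [getD_set_eq]
          split_ifs with hc
          · simp only [List.length_cons] at hdv
            push_cast at hdv ⊢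
            omega
          · exact hok
    · intro w hw
      exact hbnd w (by simp [hw])

theorem pc_bounds (n : Int) (a : List Int) (hn : 2 ≤ n) :
    (pcList n a).length = n.toNat ∧
    (∀ j, j < n.toNat → 1 ≤ (pcList n a).getD j 0 ∧ (pcList n a).getD j 0 ≤ (n.toNat : Int)) := by
  apply passBounds
  · simp
  · intro x
    rw [PySem.Dict.getD_empty, PySem.List.length_pyRange_one]
    constructor
    · omega
    · push_cast; omega
  · intro j hj
    left
    rw [PySem.List.mem_pyRange_one]
    omega
  · intro i hi
    rw [PySem.List.mem_pyRange_one] at hi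
    omega

theorem sc_bounds (n : Int) (a : List Int) (hn : 2 ≤ n) :
    (scList n a).length = n.toNat ∧
    (∀ j, j < n.toNat → 1 ≤ (scList n a).getD j 0 ∧ (scList n a).getD j 0 ≤ (n.toNat : Int)) := by
  apply passBounds
  · simp
  · intro x
    rw [PySem.Dict.getD_empty, PySem.List.length_pyRange_neg_one]
    constructor
    · omega
    · push_cast; omega
  · intro j hj
    left
    rw [PySem.List.mem_pyRange_neg_one]
    omega
  · intro i hi
    rw [PySem.List.mem_pyRange_neg_one] at hi
    omega

-- ---------- counting helpers ----------
def scv (sc : List Int) (j : Nat) : Nat := (sc.getD j 0).toNat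

def valsAbove (sc : List Int) (N m : Nat) : List Nat :=
  (List.range (N - m)).map (fun t => scv sc (N - 1 - t))

def cntI (n : Int) (pc sc : List Int) (i : Int) : Int :=
  ((PySem.List.pyRange (i+1) n 1).countP
    (fun j => decide (PySem.List.pyGetD sc j 0 < PySem.List.pyGetD pc i 0)) : Nat)

def sumCnt (n : Int) (pc sc : List Int) (m : Nat) : Int :=
  ((List.range m).map (fun i : Nat => cntI n pc sc (i : Int))).sum

theorem valsAbove_succ (sc : List Int) (N m : Nat) (h : m < N) :
    valsAbove sc N m = valsAbove sc N (m+1) ++ [scv sc m] := by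
  unfold valsAbove
  have h1 : N - m = (N - m - 1) + 1 := by omega
  rw [h1, List.range_succ, List.map_append]
  have h2 : N - (m + 1) = N - m - 1 := by omega
  rw [h2]
  congr 1
  simp only [List.map_cons, List.map_nil]
  congr 2
  omega

theorem range_reverse_map (M : Nat) :
    (List.range M).reverse = (List.range M).map (fun t => M - 1 - t) := by
  apply List.ext_getElem
  · simp
  · intro i h1 h2
    simp only [List.length_reverse, List.length_range, List.length_map] at h1 h2
    simp only [List.getElem_reverse, List.getElem_map, List.length_range, List.getElem_range]
    try omega

theorem countP_range_rev (M : Nat) (p q : Nat → Bool) (h : ∀ t, t < M → p t = q (M - 1 - t)) :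
    (List.range M).countP p = (List.range M).countP q := by
  conv_rhs => rw [← List.countP_reverse, range_reverse_map, List.countP_map]
  apply List.countP_congr
  intro t ht
  rw [List.mem_range] at ht
  rw [h t ht]
  exact Iff.rfl

-- the queried count equals B's inner-loop count for row m
theorem count_eq_cnt (n : Int) (pc sc : List Int) (N : Nat) (hN : n = (N:Int)) (m : Nat)
    (hm : m < N)
    (hpc : ∀ j, j < N → 1 ≤ pc.getD j 0 ∧ pc.getD j 0 ≤ (N:Int))
    (hsc : ∀ j, j < N → 1 ≤ sc.getD j 0 ∧ sc.getD j 0 ≤ (N:Int)) :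
    (((valsAbove sc N (m+1)).countP
        (fun v => decide (v ≤ (pc.getD m 0 - 1).toNat)) : Nat) : Int) = cntI n pc sc ↑m := by
  unfold cntI valsAbove
  congr 1
  rw [List.countP_map]
  have hrange : PySem.List.pyRange ((m:Int)+1) n 1 =
      (List.range ((n - ((m:Int)+1)).toNat)).map (fun k => ((m:Int)+1) + ↑k) := by
    rw [PySem.List.pyRange_one]
  rw [hrange, List.countP_map]
  have hM : (n - ((m:Int)+1)).toNat = N - (m+1) := by omega
  rw [hM]
  apply countP_range_rev
  intro t ht
  simp only [Function.comp]
  have hj : N - 1 - t = m + 1 + (N - (m+1) - 1 - t) := by omega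
  set j := N - 1 - t with hjdef
  have hjN : j < N := by omega
  have hscj := hsc j hjN
  have hpcm := hpc m hm
  have hc : ((m:Int)+1) + ↑(N - (m+1) - 1 - t) = (j : Int) := by push_cast; omega
  simp only [hc]
  simp only [PySem.List.pyGetD_natCast]
  rw [decide_eq_decide]
  unfold scv
  have hsame : sc.getD (N - 1 - t) 0 = sc.getD j 0 := by rw [hjdef]
  omega

-- ---------- A's Fenwick loop computes the pair count ----------
theorem loopA (n : Int) (pc sc : List Int) (N : Nat) (hN : n = (N:Int))
    (hpc : ∀ j, j < N → 1 ≤ pc.getD j 0 ∧ pc.getD j 0 ≤ (N:Int))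
    (hsc : ∀ j, j < N → 1 ≤ sc.getD j 0 ∧ sc.getD j 0 ≤ (N:Int)) :
    ∀ (m : Nat), m ≤ N → ∀ (tot : Int),
    ((PySem.List.pyRange ((m:Int) - 1) (-1) (-1)).foldl
      (fun (st : List Int × Int) i =>
        let countLess := fenQuery st.1 (PySem.List.pyGetD pc i 0 - 1) 0 (n.toNat + 1)
        (fenUpdate n 1 st.1 (PySem.List.pyGetD sc i 0) (n.toNat + 1), st.2 + countLess))
      (buildN N (valsAbove sc N m), tot)).2 = tot + sumCnt n pc sc m := by
  intro m
  induction m with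
  | zero =>
    intro _ tot
    rw [PySem.List.pyRange_neg_one_eq_nil (by norm_num)]
    simp [sumCnt]
  | succ m ih =>
    intro hm tot
    have hmN : m < N := by omega
    have hcons : PySem.List.pyRange (((m:Nat)+1:Int) - 1) (-1) (-1) =
        (m:Int) :: PySem.List.pyRange ((m:Int) - 1) (-1) (-1) := by
      rw [show (((m:Nat)+1:Int) - 1) = (m:Int) by push_cast; ring]
      exact PySem.List.pyRange_neg_one_cons (by omega)
    rw [show (((m+1:Nat)):Int) - 1 = ((m:Nat)+1:Int) - 1 by push_cast; ring, hcons,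
      List.foldl_cons]
    -- evaluate the single step at index m
    have hntn : n.toNat = N := by omega
    have hscm := hsc m hmN
    have hpcm := hpc m hmN
    have hupd : fenUpdate n 1 (buildN N (valsAbove sc N (m+1)))
        (PySem.List.pyGetD sc (m:Int) 0) (n.toNat + 1) = buildN N (valsAbove sc N m) := by
      rw [PySem.List.pyGetD_natCast,
        show sc.getD m 0 = ((scv sc m : Nat) : Int) by unfold scv; omega,
        hntn, hN, lift_upd N (N+1) _ (scv sc m) (by unfold scv; omega),
        ← buildN_append, ← valsAbove_succ sc N m hmN]
    have hqry : fenQuery (buildN N (valsAbove sc N (m+1)))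
        (PySem.List.pyGetD pc (m:Int) 0 - 1) 0 (n.toNat + 1) = cntI n pc sc ↑m := by
      rw [PySem.List.pyGetD_natCast, lift_qry, hntn,
        qcount N (valsAbove sc N (m+1)) ((pc.getD m 0 - 1).toNat) 0 (N+1)
          ?_ (by omega) (by omega)]
      · rw [zero_add]
        exact count_eq_cnt n pc sc N hN m hmN hpc hsc
      · intro v hv
        unfold valsAbove at hv
        rw [List.mem_map] at hv
        obtain ⟨t, ht, rfl⟩ := hv
        rw [List.mem_range] at ht
        have hj : N - 1 - t < N := by omega
        have := hsc (N - 1 - t) hj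
        unfold scv
        omega
    simp only [hupd, hqry]
    rw [ih (by omega) (tot + cntI n pc sc ↑m)]
    unfold sumCnt
    rw [List.range_succ, List.map_append, List.sum_append]
    simp
    ring

-- ---------- assembling both ports ----------
theorem solve_eq (n : Int) (a : List Int) : solve n a = solve_alt n a := by
  by_cases h1 : n ≤ 1
  · simp [solve, solve_alt, h1]
  · have hn : 2 ≤ n := by omega
    set N := n.toNat with hNdef
    have hN : n = (N:Int) := by omega
    obtain ⟨hpclen, hpcb⟩ := pc_bounds n a hn
    obtain ⟨hsclen, hscb⟩ := sc_bounds n a hn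
    rw [solve, solve_alt, if_neg h1, if_neg h1]
    -- A side
    have hinit : List.replicate (n.toNat + 1) (0:Int) = buildN N (valsAbove (scList n a) N N) := by
      unfold valsAbove
      rw [Nat.sub_self]
      simp [buildN, hNdef]
    have hlist : PySem.List.pyRange (n-1) (-1) (-1) =
        PySem.List.pyRange ((N:Int) - 1) (-1) (-1) := by rw [← hN]
    rw [hinit, hlist,
      loopA n (pcList n a) (scList n a) N hN hpcb hscb N le_rfl 0, zero_add]
    dsimp only
    -- B side
    have hinner : ∀ (i : Int) (total : Int),
        (PySem.List.pyRange (i+1) n 1).foldl (fun total j =>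
          if PySem.List.pyGetD (scList n a) j 0 < PySem.List.pyGetD (pcList n a) i 0
          then total + 1 else total) total = total + cntI n (pcList n a) (scList n a) i := by
      intro i total
      rw [PySem.List.foldl_ite_add_one]
      rfl
    have hcong := PySem.List.foldl_congr_mem (l := PySem.List.pyRange 0 n 1) (init := (0:Int))
      (f := fun (total : Int) (i : Int) => (PySem.List.pyRange (i+1) n 1).foldl
        (fun total j => if PySem.List.pyGetD (scList n a) j 0 < PySem.List.pyGetD (pcList n a) i 0
          then total + 1 else total) total)
      (g := fun (total : Int) (i : Int) => total + cntI n (pcList n a) (scList n a) i)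
      (fun acc x _ => hinner x acc)
    rw [hcong, PySem.List.foldl_add, zero_add]
    unfold sumCnt
    rw [PySem.List.pyRange_one, List.map_map, show (n - 0).toNat = N from by omega]
    apply congrArg
    apply List.map_congr_left
    intro k _
    simp [Function.comp]

-- ===== VERDICT (by name: the statement is the Claim_ definition above) =====
theorem solve_spec : Claim_equal_solve := by
  intro n a _ _
  show solve n a = solve_alt n a
  exact solve_eq n a
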